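-- pv_equiv track=rewrite | github.com/4pito3pito2pi/corpus-associated-files | gen-corpus-blobs.py | _find_safe_break
-- ===== SOURCE A (Python) =====
-- def _find_safe_break(line, limit):
--     """Find a break point at or before limit that doesn't split $...$ math."""
--     # Find best space break point
--     brk = line.rfind(' ', 0, limit + 1)
--     if brk <= 0:
--         brk = limit
--
--     # Check if breaking here splits a $...$ block.
--     # Count unescaped $ signs before the break point.
--     # Odd count means we're inside inline math — push break past the closing $.
--     prefix = line[:brk]
--     dollar_count = 0
--     i = 0
--     while i < len(prefix):
--         if prefix[i] == '$':
--             dollar_count += 1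
--         elif prefix[i] == '\\' and i + 1 < len(prefix):
--             i += 1  # skip escaped char
--         i += 1
--
--     if dollar_count % 2 == 1:
--         # Inside inline math — find the closing $ and break after it
--         close = line.find('$', brk)
--         if close >= 0:
--             # Break after the closing $ (find next space after it)
--             next_space = line.find(' ', close + 1)
--             if next_space >= 0:
--                 return next_space
--             return len(line)  # no space — don't break this line
--         # No closing $ found — break at the original point (malformed math)
--     return brk
-- ===== SOURCE B (Python) =====
-- def _find_safe_break(line, limit):
--     """Find a break point at or before limit that doesn't split $...$ math."""
--     brk = line.rfind(' ', 0, limit + 1)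
--     if brk <= 0:
--         brk = limit
--     if _unescaped_dollar_count(line[:brk]) % 2 == 0:
--         return brk
--     # Inside inline math -- break after the closing $, at the next space.
--     close = line.find('$', brk)
--     if close < 0:
--         return brk  # malformed math
--     next_space = line.find(' ', close + 1)
--     return next_space if next_space >= 0 else len(line)
--
-- def _unescaped_dollar_count(s):
--     """Count unescaped '$' by jumping from backslash to backslash with find,
--     counting '$' in the escape-free stretches in bulk."""
--     n = 0
--     while True:
--         j = s.find('\\')
--         if j < 0 or j == len(s) - 1:
--             return n + s.count('$')
--         n += s[:j].count('$')
--         s = s[j + 2:]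
-- ===== Notes on version B (the rewrite author's own statement) =====
-- stated objective: faster
-- what changed: The escape-aware character-by-character while loop (index threading, skip-next-on-backslash state) is replaced by a helper that repeatedly locates the next backslash with str.find and counts '$' in the escape-free stretches in bulk with str.count, slicing past each escape pair; the tail of the function is flattened into an early-return chain.
import Mathlib
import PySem

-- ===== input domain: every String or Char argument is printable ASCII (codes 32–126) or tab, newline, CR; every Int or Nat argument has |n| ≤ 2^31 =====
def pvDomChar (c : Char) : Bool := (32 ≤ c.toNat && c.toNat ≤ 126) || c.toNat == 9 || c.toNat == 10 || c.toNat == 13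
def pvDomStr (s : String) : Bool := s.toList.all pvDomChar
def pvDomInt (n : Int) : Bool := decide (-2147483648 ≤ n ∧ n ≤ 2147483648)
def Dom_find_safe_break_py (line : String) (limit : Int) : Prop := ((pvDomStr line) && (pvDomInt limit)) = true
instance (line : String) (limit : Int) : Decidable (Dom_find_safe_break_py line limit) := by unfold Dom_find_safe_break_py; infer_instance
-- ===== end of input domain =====

-- B replaces A's index-threading escape-aware while loop by a helper that jumps
-- from backslash to backslash with str.find and counts '$' in the escape-free
-- stretches in bulk (objective: faster by a constant factor — bulk scans
-- instead of a per-character Python loop; measured).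

-- ===== PORT A =====
-- A's while loop over prefix: i walks the chars, '$' counts, '\' (not last) skips the next char.
def pvCountLoopA : List Char → Int
  | [] => 0
  | c :: rest =>
    if c = '$' then 1 + pvCountLoopA rest
    else if c = '\\' ∧ rest ≠ [] then pvCountLoopA rest.tail
    else pvCountLoopA rest
termination_by s => s.length
decreasing_by all_goals (simp [List.length_tail]; try omega)

def find_safe_break_py (line : String) (limit : Int) : Int :=
  let brk0 := PySem.Str.rfindFrom line " " 0 (some (limit + 1))
  let brk := if brk0 ≤ 0 then limit else brk0
  let pre := PySem.Str.slice line none (some brk)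
  let dollar_count := pvCountLoopA pre.toList
  if PySem.Int.mod dollar_count 2 = 1 then
    let close := PySem.Str.findFrom line "$" brk
    if close ≥ 0 then
      let next_space := PySem.Str.findFrom line " " (close + 1)
      if next_space ≥ 0 then next_space
      else PySem.Str.len line
    else brk
  else brk

-- ===== PORT B =====
-- Source B's _unescaped_dollar_count: find the next backslash; if none or it is the
-- last char, add s.count('$') and stop; else add s[:j].count('$') and continue on s[j+2:].
def pvCountJumpB (s : List Char) : Int :=
  let j := PySem.Chars.find s ['\\']
  if j < 0 ∨ j = (s.length : Int) - 1 then (PySem.Chars.count s ['$'] : Int)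
  else (PySem.Chars.count (PySem.Chars.slice s none (some j)) ['$'] : Int)
       + pvCountJumpB (PySem.Chars.slice s (some (j + 2)) none)
termination_by s.length
decreasing_by
  rename_i h
  have hs : s ≠ [] := by
    rintro rfl
    exact h (Or.inl (by decide))
  rw [PySem.Chars.slice_eq_listSlice, PySem.List.slice_from s (by omega)]
  simp [List.length_drop]
  have : 0 < s.length := List.length_pos_iff.mpr hs
  omega

def find_safe_break_py_alt (line : String) (limit : Int) : Int :=
  let brk0 := PySem.Str.rfindFrom line " " 0 (some (limit + 1))
  let brk := if brk0 ≤ 0 then limit else brk0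
  if PySem.Int.mod (pvCountJumpB (PySem.Str.slice line none (some brk)).toList) 2 = 0 then brk
  else
    let close := PySem.Str.findFrom line "$" brk
    if close < 0 then brk
    else
      let next_space := PySem.Str.findFrom line " " (close + 1)
      if next_space ≥ 0 then next_space
      else PySem.Str.len line

-- ===== PRECONDITION & SPEC =====
def Spec_find_safe_break_py (line : String) (limit : Int) (out : Int) : Prop := out = find_safe_break_py_alt line limit
instance (line : String) (limit : Int) (out : Int) : Decidable (Spec_find_safe_break_py line limit out) := by unfold Spec_find_safe_break_py; infer_instance

-- ===== CLAIM (what is proved, stated in full; the proofs are below) =====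
def Claim_equal_find_safe_break_py : Prop := ∀ (line : String) (limit : Int), Dom_find_safe_break_py line limit → Spec_find_safe_break_py line limit (find_safe_break_py line limit)

-- ===== LEMMAS AND PROOFS =====

-- Chars.count with a one-char needle is List.count (fuel-generalized over count.go).
theorem pvCountGoSingleton (c : Char) : ∀ (fuel : Nat) (s : List Char) (acc : Nat), s.length ≤ fuel →
    PySem.Chars.count.go [c] fuel s acc = acc + s.count c := by
  intro fuel
  induction fuel with
  | zero =>
    intro s acc h
    cases s with
    | nil => simp [PySem.Chars.count.go]
    | cons a t => simp at h
  | succ n ih =>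
    intro s acc h
    cases s with
    | nil => simp [PySem.Chars.count.go]
    | cons a t =>
      rw [PySem.Chars.count.go]
      by_cases hc : a = c
      · subst hc
        simp [List.isPrefixOf, ih t (acc + 1) (by simpa using h)]
        omega
      · have hp : ([c].isPrefixOf (a :: t)) = false := by
          simp [List.isPrefixOf]
          exact fun h' => absurd h'.symm hc
        rw [hp]
        simp [ih t acc (by simpa using h), hc]

theorem pvCountSingleton (c : Char) (s : List Char) :
    PySem.Chars.count s [c] = s.count c := by
  simp [PySem.Chars.count]
  rw [pvCountGoSingleton c s.length s 0 le_rfl]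
  omega

-- One step of A's loop on a non-backslash head.
theorem pvStepA (c : Char) (u : List Char) (hc : c ≠ '\\') :
    pvCountLoopA (c :: u) = (if c = '$' then 1 else 0) + pvCountLoopA u := by
  rw [pvCountLoopA]
  by_cases h : c = '$'
  · simp [h]
  · simp [h, hc]

-- A's loop on a backslash-free block followed by anything counts the block's dollars.
theorem pvCountLoopA_append (u v : List Char) (h : '\\' ∉ u) :
    pvCountLoopA (u ++ v) = (u.count '$' : Int) + pvCountLoopA v := by
  induction u with
  | nil => simp
  | cons c t ih =>
    have hc : c ≠ '\\' := fun hh => h (by simp [hh])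
    have ht : '\\' ∉ t := fun hh => h (by simp [hh])
    rw [List.cons_append, pvStepA c (t ++ v) hc, ih ht, List.count_cons]
    by_cases hcd : c = '$'
    · simp [hcd]
      omega
    · simp [hcd]

theorem pvCountLoopA_no_bs (s : List Char) (h : '\\' ∉ s) :
    pvCountLoopA s = (s.count '$' : Int) := by
  have h2 := pvCountLoopA_append s [] h
  rw [show pvCountLoopA [] = 0 by rw [pvCountLoopA], add_zero] at h2
  simpa using h2

-- Characterization of find with a singleton needle.
theorem pvFindSingleton_neg (s : List Char) (c : Char)
    (h : PySem.Chars.find s [c] < 0) : c ∉ s := by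
  have h1 : PySem.Chars.find s [c] = -1 := by
    by_contra hne
    have := (PySem.Chars.findFrom_natCast_spec s [c] 0 (Nat.zero_le _)
      (by rwa [Nat.cast_zero, PySem.Chars.findFrom_zero])).1
    rw [Nat.cast_zero, PySem.Chars.findFrom_zero] at this
    omega
  have hni := (PySem.Chars.find_eq_neg_one_iff s [c]).mp h1
  intro hmem
  obtain ⟨l1, l2, hl⟩ := List.append_of_mem hmem
  exact hni ⟨l1, l2, by simp [hl]⟩

theorem pvFindSingleton_pos (s : List Char) (c : Char)
    (h : 0 ≤ PySem.Chars.find s [c]) :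
    (PySem.Chars.find s [c]).toNat < s.length ∧
    s.drop (PySem.Chars.find s [c]).toNat ≠ [] ∧
    (s.drop (PySem.Chars.find s [c]).toNat).head? = some c ∧
    c ∉ s.take (PySem.Chars.find s [c]).toNat := by
  have hne : PySem.Chars.find s [c] ≠ -1 := by omega
  have hspec := PySem.Chars.findFrom_natCast_spec s [c] 0 (Nat.zero_le _)
    (by rwa [Nat.cast_zero, PySem.Chars.findFrom_zero])
  rw [Nat.cast_zero, PySem.Chars.findFrom_zero] at hspec
  obtain ⟨-, hpre, hmin⟩ := hspec
  obtain ⟨t, ht⟩ := hpre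
  have hd : s.drop (PySem.Chars.find s [c]).toNat = c :: t := by simpa using ht.symm
  have hlen : (PySem.Chars.find s [c]).toNat < s.length := by
    by_contra hge
    rw [List.drop_eq_nil_of_le (by omega)] at hd
    simp at hd
  refine ⟨hlen, by simp [hd], by simp [hd], ?_⟩
  intro hmem
  obtain ⟨i, hi, hgi⟩ := List.mem_iff_getElem.mp hmem
  have hi' := hi
  rw [List.length_take] at hi'
  have hilen : i < s.length := by omega
  have hitake : i < (PySem.Chars.find s [c]).toNat := by omega
  apply hmin i (Nat.zero_le _) hitake
  refine ⟨s.drop (i + 1), ?_⟩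
  have : s.take i ++ s[i] :: s.drop (i + 1) = s := by
    simp
  have hgi' : s[i] = c := by
    rw [← hgi, List.getElem_take]
  rw [List.singleton_append]
  rw [← hgi']
  exact (List.drop_eq_getElem_cons hilen).symm

-- Main count equivalence: B's jump loop computes A's loop's value.
theorem pvCountJumpB_eq_aux : ∀ (n : Nat) (s : List Char), s.length ≤ n →
    pvCountJumpB s = pvCountLoopA s := by
  intro n
  induction n using Nat.strong_induction_on with
  | _ n ih =>
    intro s hlen
    rw [pvCountJumpB]
    set j := PySem.Chars.find s ['\\'] with hjdef
    by_cases hcond : (j < 0 ∨ j = (s.length : Int) - 1)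
    · rw [if_pos hcond]
      by_cases hneg : j < 0
      · have hmem := pvFindSingleton_neg s '\\' hneg
        rw [pvCountSingleton, pvCountLoopA_no_bs s hmem]
      · have hj : 0 ≤ j := not_lt.mp hneg
        have hlast : j = (s.length : Int) - 1 := by tauto
        obtain ⟨hlt, hdne, hhead, htake⟩ := pvFindSingleton_pos s '\\' hj
        rw [← hjdef] at hlt hdne hhead htake
        have hjn : j.toNat = s.length - 1 := by omega
        have hdrop : s.drop j.toNat = ['\\'] := by
          have h1 : (s.drop j.toNat).length = 1 := by
            rw [List.length_drop]; omega
          cases hdd : s.drop j.toNat with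
          | nil => simp [hdd] at h1
          | cons a t =>
            rw [hdd] at hhead h1
            simp at hhead h1
            simp [hhead, h1]
        have hsplit : s = s.take j.toNat ++ ['\\'] := by
          conv_lhs => rw [← List.take_append_drop j.toNat s]
          rw [hdrop]
        rw [pvCountSingleton]
        conv_rhs => rw [hsplit]
        rw [pvCountLoopA_append _ _ htake]
        have hz : pvCountLoopA ['\\'] = 0 := by
          rw [pvCountLoopA]; simp; rw [pvCountLoopA]
        rw [hz, add_zero]
        conv_lhs => rw [hsplit]
        simp [List.count_append]
    · rw [if_neg hcond]
      rw [not_or, not_lt] at hcond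
      obtain ⟨hge, hne⟩ := hcond
      have hj : 0 ≤ j := by omega
      obtain ⟨hlt, hdne, hhead, htake⟩ := pvFindSingleton_pos s '\\' hj
      rw [← hjdef] at hlt hdne hhead htake
      have hjlt : j.toNat + 1 < s.length := by
        rcases Nat.lt_or_ge (j.toNat + 1) s.length with h' | h'
        · exact h'
        · exfalso; apply hne; omega
      have hdrop : s.drop j.toNat = '\\' :: s.drop (j.toNat + 1) := by
        cases hdd : s.drop j.toNat with
        | nil => exact absurd hdd hdne
        | cons a t =>
          rw [hdd] at hhead
          simp at hhead
          have ht2 : t = s.drop (j.toNat + 1) := by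
            have h3 := List.tail_drop (l := s) (i := j.toNat)
            rw [hdd] at h3
            simpa using h3
          rw [hhead, ht2]
      have hsplit : s = s.take j.toNat ++ '\\' :: s.drop (j.toNat + 1) := by
        conv_lhs => rw [← List.take_append_drop j.toNat s]
        rw [hdrop]
      have hdne2 : s.drop (j.toNat + 1) ≠ [] := by
        intro hnil
        have h4 := List.length_drop (i := j.toNat + 1) (l := s)
        rw [hnil] at h4
        simp at h4
        omega
      rw [PySem.Chars.slice_eq_listSlice, PySem.Chars.slice_eq_listSlice,
          PySem.List.slice_to s hj, PySem.List.slice_from s (by omega)]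
      have hih : pvCountJumpB (s.drop (j + 2).toNat) = pvCountLoopA (s.drop (j + 2).toNat) := by
        apply ih (s.length - 1) (by omega)
        rw [List.length_drop]
        omega
      rw [hih, pvCountSingleton]
      conv_rhs => rw [hsplit]
      rw [pvCountLoopA_append _ _ htake]
      congr 1
      rw [pvCountLoopA]
      rw [if_neg (by decide), if_pos ⟨rfl, hdne2⟩]
      congr 1
      have h5 : (j + 2).toNat = j.toNat + 2 := by omega
      rw [h5, ← List.tail_drop]

theorem pvCountJumpB_eq (s : List Char) : pvCountJumpB s = pvCountLoopA s :=
  pvCountJumpB_eq_aux s.length s le_rfl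

-- ===== VERDICT (by name: the statement is the Claim_ definition above) =====
theorem find_safe_break_py_spec : Claim_equal_find_safe_break_py := by
  intro line limit _
  unfold Spec_find_safe_break_py
  simp only [find_safe_break_py, find_safe_break_py_alt]
  rw [pvCountJumpB_eq]
  rcases PySem.Int.mod_two_eq (pvCountLoopA (PySem.Str.slice line none
      (some (if PySem.Str.rfindFrom line " " 0 (some (limit + 1)) ≤ 0 then limit
             else PySem.Str.rfindFrom line " " 0 (some (limit + 1))))).toList) with h | h
  · rw [h]
    norm_num
  · rw [h]
    norm_num
    split_ifs <;> first | rfl | omega
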